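-- pv_equiv track=rewrite | github.com/ostilaru/Resources | SeisHandler-0.1.0/SeisHandler/pattern_utils.py | create_regex_pattern
-- ===== SOURCE A (Python) =====
-- from collections import OrderedDict, Counter
--
-- field_to_regex = OrderedDict({
--     "YYYY": r"(?P<year>\d{4})",  # 4 digits for year
--     "YY": r"(?P<year>\d{2})",  # 2 digits for year
--     "MM": r"(?P<month>\d{2})",  # 2 digits for month
--     "DD": r"(?P<day>\d{2})",  # 2 digits for day
--     "JJJ": r"(?P<jday>\d{3})",  # 3 digits for day of year
--     "HH": r"(?P<hour>\d{2})",  # 2 digits for hour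
--     "MI": r"(?P<minute>\d{2})",  # 2 digits for minute
--     "home": r"(?P<home>\w+)",  # for home directory
--     "network": r"(?P<network>\w+)",  # for network code
--     "event": r"(?P<event>\w+)",  # for network code
--     "station": r"(?P<station>\w+)",  # for station name
--     "component": r"(?P<component>\w+)",  # for component name
--     "sampleF": r"(?P<sampleF>\w+)",  # for sampling frequency
--     "quality": r"(?P<quality>\w+)",  # for quality indicator
--     "locid": r"(?P<locid>\w+)",  # for location ID
--     "suffix": r"(?P<suffix>\w+)",  # for file extension
--     "label0": r"(?P<label0>\w+)",  # for file label0
--     "label1": r"(?P<label1>\w+)",  # for file label1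
--     "label2": r"(?P<label2>\w+)",  # for file label2
--     "label3": r"(?P<label3>\w+)",  # for file label3
--     "label4": r"(?P<label4>\w+)",  # for file label4
--     "label5": r"(?P<label5>\w+)",  # for file label5
--     "label6": r"(?P<label6>\w+)",  # for file label6
--     "label7": r"(?P<label7>\w+)",  # for file label7
--     "label8": r"(?P<label8>\w+)",  # for file label8
--     "label9": r"(?P<label9>\w+)",  # for file label9
-- })
--
-- def create_regex_pattern(pattern: str) -> str:
--     """
--     Create the regex pattern based on the given pattern string
--     """
--     # Replace field names with corresponding regex patterns
--     for field_name, regex in field_to_regex.items():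
--         pattern = pattern.replace('{' + field_name + '}', regex)
--     # Escape special characters and compile the final regex pattern
--     pattern = pattern.replace('.', r'\.')
--     pattern = pattern.replace('_', r'\_')
--     pattern = pattern.replace('/', r'\/')
--     # Replace '?' (any character wildcard) with regex for any characters except for special characters
--     pattern = pattern.replace('{?}', '[^. _/]*')
--     # Replace '*'(any character wildcard) with regex for any characters
--     pattern = pattern.replace('{*}', '.*')
--     return r"{}".format(pattern)
-- ===== SOURCE B (Python) =====
-- from collections import OrderedDict
--
-- field_to_regex = OrderedDict({
--     "YYYY": r"(?P<year>\d{4})",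
--     "YY": r"(?P<year>\d{2})",
--     "MM": r"(?P<month>\d{2})",
--     "DD": r"(?P<day>\d{2})",
--     "JJJ": r"(?P<jday>\d{3})",
--     "HH": r"(?P<hour>\d{2})",
--     "MI": r"(?P<minute>\d{2})",
--     "home": r"(?P<home>\w+)",
--     "network": r"(?P<network>\w+)",
--     "event": r"(?P<event>\w+)",
--     "station": r"(?P<station>\w+)",
--     "component": r"(?P<component>\w+)",
--     "sampleF": r"(?P<sampleF>\w+)",
--     "quality": r"(?P<quality>\w+)",
--     "locid": r"(?P<locid>\w+)",
--     "suffix": r"(?P<suffix>\w+)",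
--     "label0": r"(?P<label0>\w+)",
--     "label1": r"(?P<label1>\w+)",
--     "label2": r"(?P<label2>\w+)",
--     "label3": r"(?P<label3>\w+)",
--     "label4": r"(?P<label4>\w+)",
--     "label5": r"(?P<label5>\w+)",
--     "label6": r"(?P<label6>\w+)",
--     "label7": r"(?P<label7>\w+)",
--     "label8": r"(?P<label8>\w+)",
--     "label9": r"(?P<label9>\w+)",
-- })
--
-- # one substitution table: every token together with its replacement, tried in
-- # priority order ({YYYY} before {YY}); all tokens are mutually non-overlapping,
-- # so a single left-to-right pass over the input is exact.
-- _TOKENS = [('{' + k + '}', v) for k, v in field_to_regex.items()] + [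
--     ('.', r'\.'),
--     ('_', r'\_'),
--     ('/', r'\/'),
--     ('{?}', '[^. _/]*'),
--     ('{*}', '.*'),
-- ]
--
-- def create_regex_pattern(pattern: str) -> str:
--     """
--     Create the regex pattern based on the given pattern string
--     """
--     out = []
--     i = 0
--     n = len(pattern)
--     while i < n:
--         for tok, repl in _TOKENS:
--             if pattern.startswith(tok, i):
--                 out.append(repl)
--                 i += len(tok)
--                 break
--         else:
--             out.append(pattern[i])
--             i += 1
--     return ''.join(out)
-- ===== Notes on version B (the rewrite author's own statement) =====
-- stated objective: alternative
-- what changed: A makes 31 sequential full-string str.replace passes (one per token); B builds one token->replacement table and does a single left-to-right pass over the input, emitting at each position the replacement of the first matching token ({YYYY} tried before {YY}) or copying the character.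
import Mathlib
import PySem

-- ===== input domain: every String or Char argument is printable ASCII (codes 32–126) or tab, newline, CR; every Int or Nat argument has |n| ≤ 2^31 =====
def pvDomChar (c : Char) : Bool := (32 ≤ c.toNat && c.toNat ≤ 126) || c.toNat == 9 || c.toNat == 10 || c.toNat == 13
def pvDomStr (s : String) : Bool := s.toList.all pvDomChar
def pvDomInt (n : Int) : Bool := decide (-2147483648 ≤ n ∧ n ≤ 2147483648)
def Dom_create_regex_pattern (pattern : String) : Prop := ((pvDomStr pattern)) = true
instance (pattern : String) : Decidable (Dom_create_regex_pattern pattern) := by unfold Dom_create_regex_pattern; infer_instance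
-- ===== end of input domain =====

-- B replaces A's 31 sequential full-string replace passes by a single table-driven
-- left-to-right pass over the input (objective: alternative algorithm, same result).


-- ===== PORT A =====
-- literal transliteration of A: one str.replace pass per table entry, in order;
-- the final r"{}".format(pattern) is the identity on str.
def create_regex_pattern (pattern : String) : String :=
  let pattern := PySem.Str.replace pattern "{YYYY}" "(?P<year>\\d{4})"
  let pattern := PySem.Str.replace pattern "{YY}" "(?P<year>\\d{2})"
  let pattern := PySem.Str.replace pattern "{MM}" "(?P<month>\\d{2})"
  let pattern := PySem.Str.replace pattern "{DD}" "(?P<day>\\d{2})"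
  let pattern := PySem.Str.replace pattern "{JJJ}" "(?P<jday>\\d{3})"
  let pattern := PySem.Str.replace pattern "{HH}" "(?P<hour>\\d{2})"
  let pattern := PySem.Str.replace pattern "{MI}" "(?P<minute>\\d{2})"
  let pattern := PySem.Str.replace pattern "{home}" "(?P<home>\\w+)"
  let pattern := PySem.Str.replace pattern "{network}" "(?P<network>\\w+)"
  let pattern := PySem.Str.replace pattern "{event}" "(?P<event>\\w+)"
  let pattern := PySem.Str.replace pattern "{station}" "(?P<station>\\w+)"
  let pattern := PySem.Str.replace pattern "{component}" "(?P<component>\\w+)"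
  let pattern := PySem.Str.replace pattern "{sampleF}" "(?P<sampleF>\\w+)"
  let pattern := PySem.Str.replace pattern "{quality}" "(?P<quality>\\w+)"
  let pattern := PySem.Str.replace pattern "{locid}" "(?P<locid>\\w+)"
  let pattern := PySem.Str.replace pattern "{suffix}" "(?P<suffix>\\w+)"
  let pattern := PySem.Str.replace pattern "{label0}" "(?P<label0>\\w+)"
  let pattern := PySem.Str.replace pattern "{label1}" "(?P<label1>\\w+)"
  let pattern := PySem.Str.replace pattern "{label2}" "(?P<label2>\\w+)"
  let pattern := PySem.Str.replace pattern "{label3}" "(?P<label3>\\w+)"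
  let pattern := PySem.Str.replace pattern "{label4}" "(?P<label4>\\w+)"
  let pattern := PySem.Str.replace pattern "{label5}" "(?P<label5>\\w+)"
  let pattern := PySem.Str.replace pattern "{label6}" "(?P<label6>\\w+)"
  let pattern := PySem.Str.replace pattern "{label7}" "(?P<label7>\\w+)"
  let pattern := PySem.Str.replace pattern "{label8}" "(?P<label8>\\w+)"
  let pattern := PySem.Str.replace pattern "{label9}" "(?P<label9>\\w+)"
  let pattern := PySem.Str.replace pattern "." "\\."
  let pattern := PySem.Str.replace pattern "_" "\\_"
  let pattern := PySem.Str.replace pattern "/" "\\/"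
  let pattern := PySem.Str.replace pattern "{?}" "[^. _/]*"
  let pattern := PySem.Str.replace pattern "{*}" ".*"
  pattern

-- ===== PORT B =====
-- Source B's _TOKENS table: every token with its replacement, in priority order.
def pvTable : List (List Char × List Char) := [
  (['{', 'Y', 'Y', 'Y', 'Y', '}'], ['(', '?', 'P', '<', 'y', 'e', 'a', 'r', '>', '\\', 'd', '{', '4', '}', ')']),
  (['{', 'Y', 'Y', '}'], ['(', '?', 'P', '<', 'y', 'e', 'a', 'r', '>', '\\', 'd', '{', '2', '}', ')']),
  (['{', 'M', 'M', '}'], ['(', '?', 'P', '<', 'm', 'o', 'n', 't', 'h', '>', '\\', 'd', '{', '2', '}', ')']),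
  (['{', 'D', 'D', '}'], ['(', '?', 'P', '<', 'd', 'a', 'y', '>', '\\', 'd', '{', '2', '}', ')']),
  (['{', 'J', 'J', 'J', '}'], ['(', '?', 'P', '<', 'j', 'd', 'a', 'y', '>', '\\', 'd', '{', '3', '}', ')']),
  (['{', 'H', 'H', '}'], ['(', '?', 'P', '<', 'h', 'o', 'u', 'r', '>', '\\', 'd', '{', '2', '}', ')']),
  (['{', 'M', 'I', '}'], ['(', '?', 'P', '<', 'm', 'i', 'n', 'u', 't', 'e', '>', '\\', 'd', '{', '2', '}', ')']),
  (['{', 'h', 'o', 'm', 'e', '}'], ['(', '?', 'P', '<', 'h', 'o', 'm', 'e', '>', '\\', 'w', '+', ')']),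
  (['{', 'n', 'e', 't', 'w', 'o', 'r', 'k', '}'], ['(', '?', 'P', '<', 'n', 'e', 't', 'w', 'o', 'r', 'k', '>', '\\', 'w', '+', ')']),
  (['{', 'e', 'v', 'e', 'n', 't', '}'], ['(', '?', 'P', '<', 'e', 'v', 'e', 'n', 't', '>', '\\', 'w', '+', ')']),
  (['{', 's', 't', 'a', 't', 'i', 'o', 'n', '}'], ['(', '?', 'P', '<', 's', 't', 'a', 't', 'i', 'o', 'n', '>', '\\', 'w', '+', ')']),
  (['{', 'c', 'o', 'm', 'p', 'o', 'n', 'e', 'n', 't', '}'], ['(', '?', 'P', '<', 'c', 'o', 'm', 'p', 'o', 'n', 'e', 'n', 't', '>', '\\', 'w', '+', ')']),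
  (['{', 's', 'a', 'm', 'p', 'l', 'e', 'F', '}'], ['(', '?', 'P', '<', 's', 'a', 'm', 'p', 'l', 'e', 'F', '>', '\\', 'w', '+', ')']),
  (['{', 'q', 'u', 'a', 'l', 'i', 't', 'y', '}'], ['(', '?', 'P', '<', 'q', 'u', 'a', 'l', 'i', 't', 'y', '>', '\\', 'w', '+', ')']),
  (['{', 'l', 'o', 'c', 'i', 'd', '}'], ['(', '?', 'P', '<', 'l', 'o', 'c', 'i', 'd', '>', '\\', 'w', '+', ')']),
  (['{', 's', 'u', 'f', 'f', 'i', 'x', '}'], ['(', '?', 'P', '<', 's', 'u', 'f', 'f', 'i', 'x', '>', '\\', 'w', '+', ')']),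
  (['{', 'l', 'a', 'b', 'e', 'l', '0', '}'], ['(', '?', 'P', '<', 'l', 'a', 'b', 'e', 'l', '0', '>', '\\', 'w', '+', ')']),
  (['{', 'l', 'a', 'b', 'e', 'l', '1', '}'], ['(', '?', 'P', '<', 'l', 'a', 'b', 'e', 'l', '1', '>', '\\', 'w', '+', ')']),
  (['{', 'l', 'a', 'b', 'e', 'l', '2', '}'], ['(', '?', 'P', '<', 'l', 'a', 'b', 'e', 'l', '2', '>', '\\', 'w', '+', ')']),
  (['{', 'l', 'a', 'b', 'e', 'l', '3', '}'], ['(', '?', 'P', '<', 'l', 'a', 'b', 'e', 'l', '3', '>', '\\', 'w', '+', ')']),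
  (['{', 'l', 'a', 'b', 'e', 'l', '4', '}'], ['(', '?', 'P', '<', 'l', 'a', 'b', 'e', 'l', '4', '>', '\\', 'w', '+', ')']),
  (['{', 'l', 'a', 'b', 'e', 'l', '5', '}'], ['(', '?', 'P', '<', 'l', 'a', 'b', 'e', 'l', '5', '>', '\\', 'w', '+', ')']),
  (['{', 'l', 'a', 'b', 'e', 'l', '6', '}'], ['(', '?', 'P', '<', 'l', 'a', 'b', 'e', 'l', '6', '>', '\\', 'w', '+', ')']),
  (['{', 'l', 'a', 'b', 'e', 'l', '7', '}'], ['(', '?', 'P', '<', 'l', 'a', 'b', 'e', 'l', '7', '>', '\\', 'w', '+', ')']),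
  (['{', 'l', 'a', 'b', 'e', 'l', '8', '}'], ['(', '?', 'P', '<', 'l', 'a', 'b', 'e', 'l', '8', '>', '\\', 'w', '+', ')']),
  (['{', 'l', 'a', 'b', 'e', 'l', '9', '}'], ['(', '?', 'P', '<', 'l', 'a', 'b', 'e', 'l', '9', '>', '\\', 'w', '+', ')']),
  (['.'], ['\\', '.']),
  (['_'], ['\\', '_']),
  (['/'], ['\\', '/']),
  (['{', '?', '}'], ['[', '^', '.', ' ', '_', '/', ']', '*']),
  (['{', '*', '}'], ['.', '*'])
]

-- Source B's while/for-else loop: at each position emit the replacement of the first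
-- matching token (pattern.startswith(tok, i)) and skip it, else copy one character.
def scanGo : List Char → List Char
  | [] => []
  | c :: s => match pvTable.find? (fun p => p.1.isPrefixOf (c :: s)) with
    | some (t, r) => r ++ scanGo (List.drop (t.length - 1) s)
    | none => c :: scanGo s
termination_by s => s.length
decreasing_by all_goals simp

def create_regex_pattern_alt (pattern : String) : String :=
  String.ofList (scanGo pattern.toList)

-- ===== PRECONDITION & SPEC =====
def Spec_create_regex_pattern (pattern : String) (out : String) : Prop := out = create_regex_pattern_alt pattern
instance (pattern : String) (out : String) : Decidable (Spec_create_regex_pattern pattern out) := by unfold Spec_create_regex_pattern; infer_instance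

-- ===== CLAIM (what is proved, stated in full; the proofs are below) =====
def Claim_equal_create_regex_pattern : Prop := ∀ (pattern : String), Dom_create_regex_pattern pattern → Spec_create_regex_pattern pattern (create_regex_pattern pattern)

-- ===== LEMMAS AND PROOFS =====

-- Python's str.replace (nonempty needle) as a plain structural recursion.
def rep (t r : List Char) : List Char → List Char
  | [] => []
  | c :: s => if t.isPrefixOf (c :: s) then r ++ rep t r (List.drop (t.length - 1) s) else c :: rep t r s
termination_by s => s.length
decreasing_by all_goals simp

theorem go_eq (t r : List Char) (ht : t.isEmpty = false) :
    ∀ (fuel : Nat) (l acc : List Char), l.length ≤ fuel →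
      PySem.Chars.replace.go t r fuel l acc = acc.reverse ++ rep t r l := by
  intro fuel
  induction fuel with
  | zero =>
    intro l acc hl
    have : l = [] := by cases l <;> simp_all
    subst this
    simp [PySem.Chars.replace.go, rep]
  | succ fuel ih =>
    intro l acc hl
    cases l with
    | nil => simp [PySem.Chars.replace.go, rep]
    | cons c s =>
      rw [PySem.Chars.replace.go]
      by_cases h : t.isPrefixOf (c :: s) = true
      · simp only [h, if_true]
        obtain ⟨a, t', rfl⟩ : ∃ a t', t = a :: t' := by
          cases t with | nil => simp at ht | cons a t' => exact ⟨a, t', rfl⟩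
        simp only [List.length_cons, List.drop_succ_cons]
        rw [ih _ _ (by simp [List.length_drop] at hl ⊢; omega)]
        rw [rep]
        simp [h]
      · simp only [h]
        rw [ih s (c :: acc) (by simp at hl ⊢; omega)]
        rw [rep]
        simp [h]

theorem replace_eq_rep (s t r : List Char) (ht : t.isEmpty = false) :
    PySem.Chars.replace s t r = rep t r s := by
  rw [PySem.Chars.replace]
  simp [ht, go_eq t r ht s.length s [] le_rfl]

-- A's chain of replaces, written as a fold over the table.
def foldAll (tb : List (List Char × List Char)) (s : List Char) : List Char :=
  tb.foldl (fun s p => rep p.1 p.2 s) s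

theorem A_toList (p : String) :
    (create_regex_pattern p).toList = foldAll pvTable p.toList := by
  simp [create_regex_pattern, foldAll, pvTable, PySem.Str.replace, replace_eq_rep]

theorem rep_nil (t r : List Char) : rep t r [] = [] := by rw [rep.eq_def]

theorem foldAll_nil : ∀ tb, foldAll tb [] = [] := by
  intro tb
  induction tb with
  | nil => rfl
  | cons q tb ih => simp [foldAll, rep_nil] at ih ⊢; exact ih

theorem rep_cons_nomatch (t r : List Char) (c : Char) (s : List Char)
    (h : t.isPrefixOf (c :: s) = false) : rep t r (c :: s) = c :: rep t r s := by
  rw [rep]; simp [h]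

theorem rep_self (a : Char) (t' r y : List Char) :
    rep (a :: t') r ((a :: t') ++ y) = r ++ rep (a :: t') r y := by
  rw [show (a :: t') ++ y = a :: (t' ++ y) from rfl, rep]
  have hp : (a :: t').isPrefixOf (a :: (t' ++ y)) = true := by
    simp [List.isPrefixOf_iff_prefix]
  simp [hp]

-- token/output interference check: t occurs nowhere properly inside u nor
-- straddling u's right boundary.
def sliceFreeB (t u : List Char) : Bool :=
  (List.range u.length).all fun p => !(t.isPrefixOf (u.drop p)) && !((u.drop p).isPrefixOf t)

theorem sliceFreeB_iff (t u : List Char) :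
    sliceFreeB t u = true ↔
      ∀ p < u.length, t.isPrefixOf (u.drop p) = false ∧ (u.drop p).isPrefixOf t = false := by
  simp [sliceFreeB, List.mem_range]

theorem prefix_cases (t u y : List Char) (h : t.isPrefixOf (u ++ y) = true) :
    t.isPrefixOf u = true ∨ u.isPrefixOf t = true := by
  simp only [List.isPrefixOf_iff_prefix] at h ⊢
  exact List.prefix_or_prefix_of_prefix h (List.prefix_append u y)

theorem sliceFree_no_prefix (t u y : List Char) (h : sliceFreeB t u = true)
    (p : Nat) (hp : p < u.length) : t.isPrefixOf (u.drop p ++ y) = false := by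
  rcases (sliceFreeB_iff t u).1 h p hp with ⟨h1, h2⟩
  by_contra hb
  rcases prefix_cases t (u.drop p) y (by revert hb; cases t.isPrefixOf (u.drop p ++ y) <;> simp) with hc | hc
  · simp [hc] at h1
  · simp [hc] at h2

theorem rep_skip (t r : List Char) (h : sliceFreeB t u = true) :
    ∀ y, rep t r (u ++ y) = u ++ rep t r y := by
  induction u with
  | nil => intro y; rfl
  | cons a u' ih =>
    intro y
    have h0 : t.isPrefixOf ((a :: u') ++ y) = false := by
      have := sliceFree_no_prefix t (a :: u') y h 0 (by simp)
      simpa using this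
    rw [List.cons_append, rep_cons_nomatch t r a (u' ++ y) (by simpa using h0)]
    have hu' : sliceFreeB t u' = true := by
      rw [sliceFreeB_iff] at h ⊢
      intro p hp
      have := h (p + 1) (by simp; omega)
      simpa using this
    rw [ih hu' y]
    rfl

theorem foldAll_skip (tb : List (List Char × List Char)) (u : List Char)
    (H : ∀ p ∈ tb, sliceFreeB p.1 u = true) :
    ∀ y, foldAll tb (u ++ y) = u ++ foldAll tb y := by
  induction tb with
  | nil => intro y; rfl
  | cons q tb ih =>
    intro y
    have hq := H q (by simp)
    show foldAll tb (rep q.1 q.2 (u ++ y)) = u ++ foldAll tb (rep q.1 q.2 y)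
    rw [rep_skip q.1 q.2 hq y]
    exact ih (fun p hp => H p (by simp [hp])) (rep q.1 q.2 y)

theorem band_split {a b : Bool} (h : (a && b) = true) : a = true ∧ b = true := by
  simpa using h

theorem ipo_cons (a b : Char) (w l : List Char) :
    (a :: w).isPrefixOf (b :: l) = (a == b && w.isPrefixOf l) := rfl

theorem rep_prefix_rev (t r : List Char) (hr : r ≠ []) :
    ∀ x (w : List Char), (∀ a ∈ w, some a ≠ r.head?) → w.isPrefixOf (rep t r x) = true →
      w.isPrefixOf x = true := by
  intro x
  induction x using rep.induct (t := t) with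
  | case1 =>
    intro w hw hp
    simpa [rep_nil] using hp
  | case2 c s hmatch ih =>
    intro w hw hp
    rw [rep.eq_def] at hp
    simp only [hmatch, if_true] at hp
    cases w with
    | nil => simp
    | cons b w' =>
      obtain ⟨r0, r'', rfl⟩ : ∃ r0 r'', r = r0 :: r'' := by
        cases r with | nil => simp at hr | cons r0 r'' => exact ⟨r0, r'', rfl⟩
      simp only [List.cons_append, ipo_cons] at hp
      have hb : b = r0 := by
        rcases band_split hp with ⟨h1, _⟩
        exact eq_of_beq h1
      have hcon := hw b (by simp)
      rw [hb] at hcon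
      exact (hcon rfl).elim
  | case3 c s hmatch ih =>
    intro w hw hp
    rw [rep.eq_def] at hp
    simp only [Bool.not_eq_true] at hmatch
    simp only [hmatch] at hp
    cases w with
    | nil => simp
    | cons b w' =>
      simp only [ipo_cons] at hp ⊢
      rcases band_split hp with ⟨h1, h2⟩
      simp only [h1, Bool.true_and]
      exact ih w' (fun a ha => hw a (by simp [ha])) h2

theorem foldAll_cons (tb : List (List Char × List Char))
    (H1 : ∀ p ∈ tb, p.2 ≠ [])
    (H2 : ∀ p ∈ tb, ∀ q ∈ tb, ∀ a ∈ p.1.tail, some a ≠ q.2.head?) :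
    ∀ y c, (∀ p ∈ tb, p.1.isPrefixOf (c :: y) = false) →
      foldAll tb (c :: y) = c :: foldAll tb y := by
  induction tb with
  | nil => intro y c _; rfl
  | cons q tb ih =>
    intro y c Hno
    show foldAll tb (rep q.1 q.2 (c :: y)) = c :: foldAll tb (rep q.1 q.2 y)
    rw [rep_cons_nomatch q.1 q.2 c y (Hno q (by simp))]
    refine ih (fun p hp => H1 p (by simp [hp]))
      (fun p hp q' hq' => H2 p (by simp [hp]) q' (by simp [hq'])) (rep q.1 q.2 y) c ?_
    intro p hp
    by_contra hb
    have hb' : p.1.isPrefixOf (c :: rep q.1 q.2 y) = true := by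
      revert hb; cases p.1.isPrefixOf (c :: rep q.1 q.2 y) <;> simp
    obtain ⟨a, w, ha⟩ : ∃ a w, p.1 = a :: w := by
      cases hp1 : p.1 with
      | nil =>
        have := Hno p (by simp [hp])
        rw [hp1] at this
        simp [List.isPrefixOf] at this
      | cons a w => exact ⟨a, w, rfl⟩
    rw [ha] at hb'
    simp only [ipo_cons] at hb'
    rcases band_split hb' with ⟨h1, h2⟩
    have hac : a = c := eq_of_beq h1
    have hw : w.isPrefixOf y = true := by
      refine rep_prefix_rev q.1 q.2 (H1 q (by simp)) y w ?_ h2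
      intro x hx
      exact H2 p (by simp [hp]) q (by simp) x (by simp [ha, hx])
    have hyes : p.1.isPrefixOf (c :: y) = true := by
      rw [ha, hac]
      simp [hw]
    have hcontra := Hno p (by simp [hp])
    rw [hyes] at hcontra
    simp at hcontra

theorem match_key (pre post : List (List Char × List Char)) (a : Char) (t' r z : List Char)
    (Hpre : ∀ p ∈ pre, sliceFreeB p.1 (a :: t') = true)
    (Hpost : ∀ p ∈ post, sliceFreeB p.1 r = true) :
    foldAll (pre ++ ((a :: t'), r) :: post) ((a :: t') ++ z) =
      r ++ foldAll (pre ++ ((a :: t'), r) :: post) z := by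
  have hsplit : ∀ s, foldAll (pre ++ ((a :: t'), r) :: post) s =
      foldAll post (rep (a :: t') r (foldAll pre s)) := by
    intro s; simp [foldAll, List.foldl_append]
  rw [hsplit, hsplit]
  rw [foldAll_skip pre (a :: t') Hpre z]
  rw [rep_self a t' r (foldAll pre z)]
  rw [foldAll_skip post r Hpost (rep (a :: t') r (foldAll pre z))]

-- concrete table facts, checked by the kernel
set_option maxRecDepth 8000 in
theorem D1 : ∀ p ∈ pvTable, p.1 ≠ [] ∧ p.2 ≠ [] := by decide

set_option maxRecDepth 8000 in
theorem D2b : (pvTable.all fun p => pvTable.all fun q =>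
    p.1.tail.all fun a => !(some a == q.2.head?)) = true := by decide

theorem D2 : ∀ p ∈ pvTable, ∀ q ∈ pvTable, ∀ a ∈ p.1.tail, some a ≠ q.2.head? := by
  have h := D2b
  simp only [List.all_eq_true, Bool.not_eq_true'] at h
  intro p hp q hq a ha
  exact beq_eq_false_iff_ne.mp (h p hp q hq a ha)

set_option maxRecDepth 8000 in
theorem D3b : (pvTable.all fun p => pvTable.all fun q =>
    (p.1 == q.1) || sliceFreeB p.1 q.1) = true := by decide

theorem D3 : ∀ p ∈ pvTable, ∀ q ∈ pvTable, p.1 ≠ q.1 → sliceFreeB p.1 q.1 = true := by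
  have h := D3b
  simp only [List.all_eq_true] at h
  intro p hp q hq hne
  rcases Bool.or_eq_true_iff.mp (h p hp q hq) with hc | hc
  · exact absurd (eq_of_beq hc) hne
  · exact hc

set_option maxRecDepth 8000 in
theorem D4 : (pvTable.map Prod.fst).Nodup := by decide

set_option maxRecDepth 8000 in
theorem D5 : ((List.range pvTable.length).all fun j => (List.range j).all fun i =>
    sliceFreeB ((pvTable.getD j ([], [])).1) ((pvTable.getD i ([], [])).2)) = true := by decide

theorem D5' : ∀ j, j < pvTable.length → ∀ i, i < j →
    sliceFreeB ((pvTable.getD j ([], [])).1) ((pvTable.getD i ([], [])).2) = true := by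
  have h := D5
  simp only [List.all_eq_true, List.mem_range] at h
  intro j hj i hij
  exact h j hj i hij

theorem main_eq : ∀ l : List Char, foldAll pvTable l = scanGo l := by
  intro l
  induction l using scanGo.induct with
  | case1 => rw [scanGo]; exact foldAll_nil pvTable
  | case2 c s t r hfind ih =>
    have hmem : (t, r) ∈ pvTable := List.mem_of_find?_eq_some hfind
    have hpre : t.isPrefixOf (c :: s) = true := by
      have := List.find?_some hfind
      simpa using this
    obtain ⟨a, t', rfl⟩ : ∃ a t', t = a :: t' := by
      cases ht : t with
      | nil => exact absurd ht (D1 (t, r) hmem).1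
      | cons a t' => exact ⟨a, t', rfl⟩
    obtain ⟨z, hz⟩ : ∃ z, (a :: t') ++ z = c :: s :=
      (List.isPrefixOf_iff_prefix.mp hpre)
    have hc : a = c := by simpa using congrArg (fun l => l.head?) hz
    have hs : t' ++ z = s := by simpa using congrArg List.tail hz
    obtain ⟨pre, post, hdec⟩ := List.append_of_mem hmem
    have hnd := D4
    rw [hdec] at hnd
    simp only [List.map_append, List.map_cons, List.nodup_append] at hnd
    have hne_pre : ∀ p ∈ pre, p.1 ≠ (a :: t') := by
      intro p hp
      exact fun he => hnd.2.2 p.1 (List.mem_map_of_mem hp) (a :: t') (by simp) he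
    have Hpre : ∀ p ∈ pre, sliceFreeB p.1 (a :: t') = true := by
      intro p hp
      exact D3 p (by rw [hdec]; exact List.mem_append_left _ hp) ((a :: t'), r)
        (by rw [hdec]; exact List.mem_append_right _ (by simp)) (hne_pre p hp)
    have Hpost : ∀ p ∈ post, sliceFreeB p.1 r = true := by
      intro p hp
      obtain ⟨m, hm, hpm⟩ := List.mem_iff_getElem.mp hp
      have hjlen : pre.length + (m + 1) < pvTable.length := by
        rw [hdec]; simp; omega
      have hgj : pvTable.getD (pre.length + (m + 1)) ([], []) = p := by
        rw [List.getD_eq_getElem?_getD, hdec,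
          List.getElem?_append_right (by omega)]
        simp [hpm, hm]
      have hgi : pvTable.getD pre.length ([], []) = ((a :: t'), r) := by
        rw [List.getD_eq_getElem?_getD, hdec,
          List.getElem?_append_right (by omega)]
        simp
      have := D5' (pre.length + (m + 1)) hjlen pre.length (by omega)
      rw [hgj, hgi] at this
      exact this
    have key : foldAll pvTable ((a :: t') ++ z) = r ++ foldAll pvTable z := by
      rw [hdec]
      exact match_key pre post a t' r z Hpre Hpost
    rw [scanGo]
    simp only [hfind]
    have hdropz : List.drop ((a :: t').length - 1) s = z := by
      rw [← hs]
      simp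
    rw [hdropz] at ih ⊢
    rw [← ih, ← key, hz]
  | case3 c s hfind ih =>
    have Hno : ∀ p ∈ pvTable, p.1.isPrefixOf (c :: s) = false := by
      intro p hp
      have := List.find?_eq_none.mp hfind p hp
      simp only [Bool.not_eq_true] at this
      exact this
    rw [scanGo]
    simp only [hfind]
    rw [← ih]
    exact foldAll_cons pvTable (fun p hp => (D1 p hp).2) D2 s c Hno

-- ===== VERDICT (by name: the statement is the Claim_ definition above) =====
theorem create_regex_pattern_spec : Claim_equal_create_regex_pattern := by
  intro pattern _
  unfold Spec_create_regex_pattern create_regex_pattern_alt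
  rw [← main_eq, ← A_toList]
  simp
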